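-- pv_equiv track=rewrite | github.com/WasabiPingKak/youtube-channel-info-fetcher | backend/services/heatmap/utils.py | convert_matrix_to_count
-- ===== SOURCE A (Python) =====
-- DAY_KEYS = ["Sun", "Mon", "Tue", "Wed", "Thu", "Fri", "Sat"]
--
-- def convert_matrix_to_count(matrix):
--     """
--     將 Firestore heatmap matrix 結構從影片 ID 陣列轉為 count 統計結構
--
--     參數:
--         matrix: dict[day] -> dict[hour] -> list[str]（影片 ID 陣列）
--
--     回傳:
--         (active_time_dict, total_count)
--         - active_time_dict: dict[day] -> dict[hour] -> int（影片數）
--         - total_count: int（所有格子影片數加總）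
--     """
--     result = {}
--     total = 0
--     for day in DAY_KEYS:
--         hour_map = matrix.get(day, {})
--         count_map = {}
--         for hour_str, video_list in hour_map.items():
--             count = len(video_list)
--             count_map[hour_str] = count
--             total += count
--         result[day] = count_map
--     return result, total
-- ===== SOURCE B (Python) =====
-- DAY_KEYS = ["Sun", "Mon", "Tue", "Wed", "Thu", "Fri", "Sat"]
--
-- def _build_counts(matrix, days):
--     if not days:
--         return {}
--     head = days[0]
--     out = {head: {h: len(v) for h, v in matrix.get(head, {}).items()}}
--     out.update(_build_counts(matrix, days[1:]))
--     return out
--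
-- def convert_matrix_to_count(matrix):
--     day_set = set(DAY_KEYS)
--     total = sum(len(vids) for day, hm in matrix.items() if day in day_set
--                 for vids in hm.values())
--     return _build_counts(matrix, DAY_KEYS), total
-- ===== Notes on version B (the rewrite author's own statement) =====
-- stated objective: alternative
-- what changed: Replaces A's fused iterative pass over DAY_KEYS (building count maps while accumulating the total in mutable state) by a recursive back-to-front construction of the result dict via dict.update, with the total computed independently by a flat filtered scan over the input matrix's own items instead of over DAY_KEYS.
import Mathlib
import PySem

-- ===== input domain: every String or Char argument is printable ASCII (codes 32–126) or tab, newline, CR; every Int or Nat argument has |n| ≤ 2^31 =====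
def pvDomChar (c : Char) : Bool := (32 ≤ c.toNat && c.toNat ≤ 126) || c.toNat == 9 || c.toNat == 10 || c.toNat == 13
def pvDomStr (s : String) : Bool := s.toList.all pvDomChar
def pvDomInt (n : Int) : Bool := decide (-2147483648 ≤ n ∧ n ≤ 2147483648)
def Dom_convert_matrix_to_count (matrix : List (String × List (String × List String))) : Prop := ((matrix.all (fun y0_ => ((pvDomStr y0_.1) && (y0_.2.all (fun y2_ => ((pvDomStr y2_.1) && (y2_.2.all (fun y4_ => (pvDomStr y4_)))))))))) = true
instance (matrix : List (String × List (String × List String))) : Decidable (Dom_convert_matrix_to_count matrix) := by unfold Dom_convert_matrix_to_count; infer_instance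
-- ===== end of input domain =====

-- B replaces A's fused iterative pass over DAY_KEYS by a recursive back-to-front construction of the
-- result dict (via dict.update) plus an independent flat filtered scan of the input for the total;
-- equivalence of RETURN values is proved on inputs with distinct outer keys.

-- ===== PORT A =====
def convert_matrix_to_count (matrix : List (String × List (String × List String))) : (List (String × List (String × Int))) × Int :=
  let dayKeys : List String := ["Sun", "Mon", "Tue", "Wed", "Thu", "Fri", "Sat"]
  let st :=
    dayKeys.foldl (fun (st : PySem.Dict String (List (String × Int)) × Int) day =>
      let hour_map : List (String × List String) := (PySem.Dict.mk matrix).getD day []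
      let ct :=
        hour_map.foldl (fun (ct : PySem.Dict String Int × Int) hv =>
          let count : Int := hv.2.length
          (ct.1.insert hv.1 count, ct.2 + count)) (PySem.Dict.empty, st.2)
      (st.1.insert day ct.1.items, ct.2)) (PySem.Dict.empty, 0)
  (st.1.items, st.2)

-- ===== PORT B =====
-- _build_counts(matrix, days): recursion on the day list; {head: comprehension} then dict.update with the rest
def cmtcBuild (matrix : List (String × List (String × List String))) : List String → PySem.Dict String (List (String × Int))
  | [] => PySem.Dict.empty
  | head :: rest =>
      let cm : List (String × Int) :=
        (((PySem.Dict.mk matrix).getD head []).foldl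
          (fun (cm : PySem.Dict String Int) hv => cm.insert hv.1 (hv.2.length : Int))
          PySem.Dict.empty).items
      (PySem.Dict.mk [(head, cm)]).update (cmtcBuild matrix rest).items

def convert_matrix_to_count_alt (matrix : List (String × List (String × List String))) : (List (String × List (String × Int))) × Int :=
  let dayKeys : List String := ["Sun", "Mon", "Tue", "Wed", "Thu", "Fri", "Sat"]
  let daySet : List String := PySem.Set.ofList dayKeys
  let total : Int :=
    matrix.foldl (fun t p =>
      if List.contains daySet p.1 then t + p.2.foldl (fun s hv => s + (hv.2.length : Int)) 0
      else t) 0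
  ((cmtcBuild matrix dayKeys).items, total)

-- ===== PRECONDITION & SPEC =====
-- Pre_ excludes association lists carrying a duplicate outer day key, which cannot arise from the
-- Python dict this function receives (A would read only the first copy, B's total scan all copies).
def Pre_convert_matrix_to_count (matrix : List (String × List (String × List String))) : Prop :=
  (matrix.map Prod.fst).Nodup
instance (matrix : List (String × List (String × List String))) : Decidable (Pre_convert_matrix_to_count matrix) := by unfold Pre_convert_matrix_to_count; infer_instance
def pvWitness_convert_matrix_to_count : (List (String × List (String × List String))) :=
  [("Sun", [("1", ["a", "b"]), ("2", [])]), ("Tue", [("0", ["x"])])]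
def Spec_convert_matrix_to_count (matrix : List (String × List (String × List String))) (out : (List (String × List (String × Int))) × Int) : Prop := out = convert_matrix_to_count_alt matrix
instance (matrix : List (String × List (String × List String))) (out : (List (String × List (String × Int))) × Int) : Decidable (Spec_convert_matrix_to_count matrix out) := by unfold Spec_convert_matrix_to_count; infer_instance

-- ===== CLAIM (what is proved, stated in full; the proofs are below) =====
def Claim_equal_convert_matrix_to_count : Prop := ∀ (matrix : List (String × List (String × List String))), Dom_convert_matrix_to_count matrix → Pre_convert_matrix_to_count matrix → Spec_convert_matrix_to_count matrix (convert_matrix_to_count matrix)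

-- ===== LEMMAS AND PROOFS =====
-- inner count map as both ports build it, and the total length sum per hour map
def pvInner (hm : List (String × List String)) : PySem.Dict String Int :=
  hm.foldl (fun cm hv => cm.insert hv.1 (hv.2.length : Int)) PySem.Dict.empty

def pvSumLens (hm : List (String × List String)) : Int :=
  (hm.map (fun hv => (hv.2.length : Int))).sum

def pvG (matrix : List (String × List (String × List String))) (d : String) : List (String × Int) :=
  (pvInner ((PySem.Dict.mk matrix).getD d [])).items

def pvS (matrix : List (String × List (String × List String))) (d : String) : Int :=
  pvSumLens ((PySem.Dict.mk matrix).getD d [])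

-- A's fused inner loop = the pure count-map build plus the sum of cell sizes
theorem pv_fused (hm : List (String × List String)) :
    ∀ (cm : PySem.Dict String Int) (t : Int),
    hm.foldl (fun (ct : PySem.Dict String Int × Int) hv =>
        (ct.1.insert hv.1 (hv.2.length : Int), ct.2 + (hv.2.length : Int))) (cm, t)
      = (hm.foldl (fun cm hv => cm.insert hv.1 (hv.2.length : Int)) cm, t + pvSumLens hm) := by
  induction hm with
  | nil => intro cm t; simp [pvSumLens]
  | cons hv rest ih =>
      intro cm t
      simp only [List.foldl_cons, ih, pvSumLens, List.map_cons, List.sum_cons]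
      exact Prod.ext rfl (by ring)

-- A's outer loop, characterised: a pure insert fold and total = sum of per-day sums
theorem pv_A_outer (matrix : List (String × List (String × List String))) :
    ∀ (days : List String) (r : PySem.Dict String (List (String × Int))) (t : Int),
    days.foldl (fun (st : PySem.Dict String (List (String × Int)) × Int) day =>
        (st.1.insert day
          (((PySem.Dict.mk matrix).getD day []).foldl (fun (ct : PySem.Dict String Int × Int) hv =>
            (ct.1.insert hv.1 (hv.2.length : Int), ct.2 + (hv.2.length : Int))) (PySem.Dict.empty, st.2)).1.items,
         (((PySem.Dict.mk matrix).getD day []).foldl (fun (ct : PySem.Dict String Int × Int) hv =>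
            (ct.1.insert hv.1 (hv.2.length : Int), ct.2 + (hv.2.length : Int))) (PySem.Dict.empty, st.2)).2)) (r, t)
      = (days.foldl (fun r d => r.insert d (pvG matrix d)) r, t + (days.map (pvS matrix)).sum) := by
  intro days
  induction days with
  | nil => intro r t; simp
  | cons d rest ih =>
      intro r t
      rw [List.foldl_cons, List.foldl_cons, pv_fused]
      show List.foldl _ (r.insert d (pvG matrix d), t + pvS matrix d) rest = _
      rw [ih]
      exact Prod.ext rfl (by simp only [List.map_cons, List.sum_cons, pvS]; ring)

-- B's recursive build lists the days in order, each with its count-map items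
theorem pv_build_items (matrix : List (String × List (String × List String))) :
    ∀ days : List String, days.Nodup →
    (cmtcBuild matrix days).items = days.map (fun d => (d, pvG matrix d)) := by
  intro days
  induction days with
  | nil => intro _; rfl
  | cons d rest ih =>
      intro h
      have hd : d ∉ rest := (List.nodup_cons.mp h).1
      have hrest := (List.nodup_cons.mp h).2
      show ((PySem.Dict.mk [(d, pvG matrix d)]).update (cmtcBuild matrix rest).items).items = _
      rw [ih hrest]
      show ((rest.map (fun d => (d, pvG matrix d))).foldl
        (fun (r : PySem.Dict String (List (String × Int))) p => r.insert p.1 p.2)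
        (PySem.Dict.mk [(d, pvG matrix d)])).items = _
      have hfresh : ∀ a ∈ rest.map (fun d => (d, pvG matrix d)),
          (PySem.Dict.mk [(d, pvG matrix d)]).contains a.1 = false := by
        intro a ha
        rcases List.mem_map.mp ha with ⟨e, he, rfl⟩
        have hne : e ≠ d := fun heq => hd (heq ▸ he)
        simp [PySem.Dict.contains_mk]
        exact fun h2 => hne h2.symm
      have hnd : ((rest.map (fun d => (d, pvG matrix d))).map Prod.fst).Nodup := by
        simpa [List.map_map, Function.comp_def] using hrest
      have hlem := PySem.Dict.items_foldl_insert_fresh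
        (l := rest.map (fun d => (d, pvG matrix d))) (k := Prod.fst) (v := Prod.snd)
        (d := PySem.Dict.mk [(d, pvG matrix d)]) hfresh hnd
      rw [hlem]
      simp [List.map_map, Function.comp_def]

-- inner total fold = pvSumLens
theorem pv_inner_total (hm : List (String × List String)) :
    ∀ s : Int, hm.foldl (fun s hv => s + (hv.2.length : Int)) s = s + pvSumLens hm := by
  induction hm with
  | nil => simp [pvSumLens]
  | cons hv rest ih =>
      intro s
      simp only [List.foldl_cons, ih, pvSumLens, List.map_cons, List.sum_cons]
      ring

-- B's total fold = sum over the matrix of the filtered per-entry sums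
theorem pv_B_total (ds : List String) (m : List (String × List (String × List String))) :
    ∀ t : Int,
    m.foldl (fun t p =>
        if ds.contains p.1 then t + p.2.foldl (fun s hv => s + (hv.2.length : Int)) 0 else t) t
      = t + (m.map (fun p => if ds.contains p.1 then pvSumLens p.2 else 0)).sum := by
  induction m with
  | nil => simp
  | cons p rest ih =>
      intro t
      rw [List.foldl_cons, List.map_cons, List.sum_cons]
      by_cases h : ds.contains p.1
      · rw [if_pos h, if_pos h, pv_inner_total, zero_add, ih]; ring
      · rw [if_neg h, if_neg h, ih]; ring

theorem pv_sum_map_add {α : Type} (l : List α) (f g : α → Int) :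
    (l.map (fun x => f x + g x)).sum = (l.map f).sum + (l.map g).sum := by
  induction l with
  | nil => simp
  | cons x rest ih => simp [ih]; ring

-- with distinct matrix keys, the filtered-by-one-key sum is the lookup's cell sum
theorem pv_lookup (d : String) :
    ∀ (m : List (String × List (String × List String))), (m.map Prod.fst).Nodup →
    (m.map (fun p => if p.1 = d then pvSumLens p.2 else 0)).sum = pvS m d := by
  intro m
  induction m with
  | nil =>
      intro _
      simp [pvS, pvSumLens, PySem.Dict.getD_eq_get?_getD]
      rfl
  | cons kv rest ih =>
      intro h
      have hk : kv.1 ∉ rest.map Prod.fst := (List.nodup_cons.mp (by simpa using h)).1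
      have hrest : (rest.map Prod.fst).Nodup := (List.nodup_cons.mp (by simpa using h)).2
      simp only [List.map_cons, List.sum_cons]
      by_cases hd : kv.1 = d
      · subst hd
        have hzero : (rest.map (fun p => if p.1 = kv.1 then pvSumLens p.2 else 0)).sum = 0 := by
          rw [List.sum_eq_zero]
          intro x hx
          rcases List.mem_map.mp hx with ⟨p, hp, rfl⟩
          have : p.1 ≠ kv.1 := fun he => hk (List.mem_map.mpr ⟨p, hp, he⟩)
          simp [this]
        rw [if_pos rfl, hzero]
        have : (PySem.Dict.mk (kv :: rest)).get? kv.1 = some kv.2 := by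
          rw [show (kv :: rest) = ((kv.1, kv.2) :: rest) by simp, PySem.Dict.get?_mk_cons]
          simp
        simp [pvS, PySem.Dict.getD_of_get?_eq_some _ _ this]
      · rw [if_neg hd, ih hrest]
        have : (PySem.Dict.mk (kv :: rest)).get? d = (PySem.Dict.mk rest).get? d := by
          rw [show (kv :: rest) = ((kv.1, kv.2) :: rest) by simp, PySem.Dict.get?_mk_cons]
          simp [hd]
        simp [pvS, PySem.Dict.getD_eq_get?_getD, this]

-- the order swap: summing the input's entries filtered by a distinct day list = summing lookups per day
theorem pv_swap (m : List (String × List (String × List String)))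
    (hm : (m.map Prod.fst).Nodup) :
    ∀ ds : List String, ds.Nodup →
    (m.map (fun p => if ds.contains p.1 then pvSumLens p.2 else 0)).sum
      = (ds.map (pvS m)).sum := by
  intro ds
  induction ds with
  | nil => intro _; simp
  | cons d rest ih =>
      intro h
      have hd : d ∉ rest := (List.nodup_cons.mp h).1
      have hrest := (List.nodup_cons.mp h).2
      have hpt : ∀ p : String × List (String × List String),
          (if (d :: rest).contains p.1 then pvSumLens p.2 else 0)
            = (if p.1 = d then pvSumLens p.2 else 0)
              + (if rest.contains p.1 then pvSumLens p.2 else 0) := by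
        intro p
        by_cases he : p.1 = d
        · have : rest.contains p.1 = false := by
            simp only [List.contains_eq_mem, decide_eq_false_iff_not]
            exact fun hmem => hd (he ▸ hmem)
          simp only [this, if_neg (by simp : ¬False), Bool.false_eq_true, if_false]
          simp [he, hd]
        · by_cases hr : rest.contains p.1 <;>
            simp [List.contains_cons, he, hr, beq_iff_eq]
      calc (m.map (fun p => if (d :: rest).contains p.1 then pvSumLens p.2 else 0)).sum
          = (m.map (fun p => (if p.1 = d then pvSumLens p.2 else 0)
              + (if rest.contains p.1 then pvSumLens p.2 else 0))).sum := by
            exact congrArg List.sum (List.map_congr_left (fun p _ => hpt p))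
        _ = (m.map (fun p => if p.1 = d then pvSumLens p.2 else 0)).sum
              + (m.map (fun p => if rest.contains p.1 then pvSumLens p.2 else 0)).sum :=
            pv_sum_map_add m _ _
        _ = pvS m d + ((rest.map (pvS m)).sum) := by rw [pv_lookup d m hm, ih hrest]
        _ = ((d :: rest).map (pvS m)).sum := by simp

-- ===== VERDICT (by name: the statement is the Claim_ definition above) =====
set_option maxHeartbeats 1000000 in
theorem convert_matrix_to_count_spec : Claim_equal_convert_matrix_to_count := by
  intro matrix _ hPre
  show convert_matrix_to_count matrix = convert_matrix_to_count_alt matrix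
  simp only [convert_matrix_to_count, convert_matrix_to_count_alt]
  rw [pv_A_outer]
  have hdays : PySem.Set.ofList ["Sun", "Mon", "Tue", "Wed", "Thu", "Fri", "Sat"]
      = ["Sun", "Mon", "Tue", "Wed", "Thu", "Fri", "Sat"] := by decide
  refine Prod.ext ?_ ?_
  · show (List.foldl (fun r d => r.insert d (pvG matrix d)) PySem.Dict.empty
        ["Sun", "Mon", "Tue", "Wed", "Thu", "Fri", "Sat"]).items
      = (cmtcBuild matrix ["Sun", "Mon", "Tue", "Wed", "Thu", "Fri", "Sat"]).items
    rw [pv_build_items matrix _ (by decide)]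
    have := PySem.Dict.items_foldl_insert_fresh
      (l := ["Sun", "Mon", "Tue", "Wed", "Thu", "Fri", "Sat"]) (k := fun d => d)
      (v := pvG matrix) (d := PySem.Dict.empty)
      (by intro a _; exact PySem.Dict.contains_empty _) (by simpa using (by decide : (["Sun", "Mon", "Tue", "Wed", "Thu", "Fri", "Sat"] : List String).Nodup))
    simpa using this
  · show 0 + (List.map (pvS matrix) ["Sun", "Mon", "Tue", "Wed", "Thu", "Fri", "Sat"]).sum
      = List.foldl (fun t p =>
          if List.contains (PySem.Set.ofList ["Sun", "Mon", "Tue", "Wed", "Thu", "Fri", "Sat"]) p.1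
          then t + p.2.foldl (fun s hv => s + (hv.2.length : Int)) 0 else t) 0 matrix
    rw [hdays, pv_B_total, pv_swap matrix hPre _ (by decide)]
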